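-- pv_equiv track=rewrite | github.com/ZY-LI-F/PaperBanana | server/services/_config_storage.py | replace_env_lines
-- ===== SOURCE A (Python) =====
-- ENV_EXPORT_PREFIX = "export "
--
-- def env_line_key(line: str) -> str | None:
--     stripped = line.strip()
--     if not stripped or stripped.startswith("#") or "=" not in stripped:
--         return None
--     key = stripped.split("=", 1)[0].strip()
--     if key.startswith(ENV_EXPORT_PREFIX):
--         key = key[len(ENV_EXPORT_PREFIX):].strip()
--     return key or None
--
-- def replace_env_lines(lines: list[str], name: str, rendered: str) -> list[str]:
--     updated = False
--     next_lines: list[str] = []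
--     for line in lines:
--         if env_line_key(line) == name:
--             next_lines.append(rendered)
--             updated = True
--             continue
--         next_lines.append(line)
--     if not updated:
--         next_lines.append(rendered)
--     return next_lines
-- ===== SOURCE B (Python) =====
-- ENV_EXPORT_PREFIX = "export "
--
-- def env_line_key(line: str) -> str | None:
--     stripped = line.strip()
--     if not stripped or stripped.startswith("#") or "=" not in stripped:
--         return None
--     key = stripped.split("=", 1)[0].strip()
--     if key.startswith(ENV_EXPORT_PREFIX):
--         key = key[len(ENV_EXPORT_PREFIX):].strip()
--     return key or None
--
-- def replace_env_lines(lines: list[str], name: str, rendered: str) -> list[str]: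
--     # Locate the first line whose key matches; if none, the answer is just
--     # the original list with `rendered` appended.
--     first = next((i for i, l in enumerate(lines) if env_line_key(l) == name), None)
--     if first is None:
--         return lines + [rendered]
--     # Keep the untouched prefix verbatim and rewrite only from the first
--     # match onward (earlier lines are known not to match).
--     return lines[:first] + [rendered if env_line_key(l) == name else l
--                             for l in lines[first:]]
-- ===== Notes on version B (the rewrite author's own statement) =====
-- stated objective: alternative
-- what changed: Instead of one loop carrying an 'updated' flag that rebuilds every element, B first locates the index of the first matching line (or appends immediately if there is none), then splices the verbatim untouched prefix with a rewritten suffix starting at that index.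
import Mathlib
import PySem

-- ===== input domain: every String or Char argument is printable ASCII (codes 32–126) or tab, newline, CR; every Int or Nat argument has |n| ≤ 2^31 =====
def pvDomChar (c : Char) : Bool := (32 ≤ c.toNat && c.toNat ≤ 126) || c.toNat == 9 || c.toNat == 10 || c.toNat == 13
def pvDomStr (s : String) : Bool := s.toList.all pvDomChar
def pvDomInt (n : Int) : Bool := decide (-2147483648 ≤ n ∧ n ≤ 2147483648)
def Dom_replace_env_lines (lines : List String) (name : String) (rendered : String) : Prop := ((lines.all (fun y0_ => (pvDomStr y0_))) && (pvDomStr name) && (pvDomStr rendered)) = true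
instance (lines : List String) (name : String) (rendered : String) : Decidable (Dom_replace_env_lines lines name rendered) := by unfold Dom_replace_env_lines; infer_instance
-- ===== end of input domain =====

-- B replaces A's single flag-carrying loop by a find-first-index pass followed by a splice:
-- untouched prefix kept verbatim, suffix rewritten; append only when no index is found.

-- ===== PORT A =====
-- shared module helper env_line_key (used by both Python files verbatim)
def env_line_key (line : String) : Option String :=
  let stripped := PySem.Str.strip line
  if PySem.Str.len stripped == 0 || PySem.Str.startswith stripped "#"
      || !(PySem.Str.isIn "=" stripped) then none
  else
    let key := PySem.Str.strip (((PySem.Str.splitMax? stripped "=" 1).getD []).headD "")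
    let key := if PySem.Str.startswith key "export "
               then PySem.Str.strip (PySem.Str.slice key (some 7) none) else key
    if PySem.Str.len key == 0 then none else some key

def replace_env_lines (lines : List String) (name : String) (rendered : String) : List String :=
  -- for line in lines: … carrying (next_lines, updated)
  let st := lines.foldl (fun (acc : List String × Bool) line =>
    if env_line_key line == some name then (acc.1 ++ [rendered], true)
    else (acc.1 ++ [line], acc.2)) ([], false)
  if !st.2 then st.1 ++ [rendered] else st.1

-- ===== PORT B =====
def replace_env_lines_alt (lines : List String) (name : String) (rendered : String) : List String :=
  -- first = next((i for i, l in enumerate(lines) if env_line_key(l) == name), None)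
  match lines.findIdx? (fun l => env_line_key l == some name) with
  | none => lines ++ [rendered]
  | some first =>
      -- lines[:first] + [rewritten suffix from first onward]
      lines.take first ++
        (lines.drop first).map (fun l => if env_line_key l == some name then rendered else l)

-- ===== PRECONDITION & SPEC =====
def Spec_replace_env_lines (lines : List String) (name : String) (rendered : String) (out : List String) : Prop := out = replace_env_lines_alt lines name rendered
instance (lines : List String) (name : String) (rendered : String) (out : List String) : Decidable (Spec_replace_env_lines lines name rendered out) := by unfold Spec_replace_env_lines; infer_instance

-- ===== CLAIM (what is proved, stated in full; the proofs are below) =====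
def Claim_equal_replace_env_lines : Prop := ∀ (lines : List String) (name : String) (rendered : String), Dom_replace_env_lines lines name rendered → Spec_replace_env_lines lines name rendered (replace_env_lines lines name rendered)

-- ===== LEMMAS AND PROOFS =====
-- A's loop state equals (accumulated prefix ++ rewritten list, flag ∨ any match).
theorem fold_eq_map_any (lines : List String) (name rendered : String)
    (acc : List String) (upd : Bool) :
    lines.foldl (fun (acc : List String × Bool) line =>
      if env_line_key line == some name then (acc.1 ++ [rendered], true)
      else (acc.1 ++ [line], acc.2)) (acc, upd)
    = (acc ++ lines.map (fun l => if env_line_key l == some name then rendered else l),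
       upd || lines.any (fun l => env_line_key l == some name)) := by
  induction lines generalizing acc upd with
  | nil => simp
  | cons h t ih =>
    rw [List.foldl_cons]
    by_cases hk : env_line_key h == some name
    · have hk' : env_line_key h = some name := by simpa using hk
      rw [if_pos hk, ih]; simp [List.map_cons, List.any_cons, hk']
    · have hk' : ¬ env_line_key h = some name := by simpa using hk
      rw [if_neg hk, ih]; simp [List.map_cons, List.any_cons, hk', Bool.eq_false_iff.mpr hk]

-- B's splice equals A's "rewrite everything, append iff no match" shape.
theorem alt_eq (lines : List String) (name rendered : String) :
    replace_env_lines_alt lines name rendered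
    = (if lines.any (fun l => env_line_key l == some name)
       then lines.map (fun l => if env_line_key l == some name then rendered else l)
       else lines.map (fun l => if env_line_key l == some name then rendered else l) ++ [rendered]) := by
  induction lines with
  | nil => simp [replace_env_lines_alt]
  | cons h t ih =>
    by_cases hk : env_line_key h = some name
    · simp [replace_env_lines_alt, List.findIdx?_cons, hk]
    · have hb : (env_line_key h == some name) = false := by simpa using hk
      unfold replace_env_lines_alt at ih ⊢
      rw [List.findIdx?_cons, hb]
      cases hf : t.findIdx? (fun l => env_line_key l == some name) with
      | none =>
        have ht : ∀ l ∈ t, ¬ env_line_key l = some name := by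
          intro l hl
          have := List.findIdx?_eq_none_iff.mp hf l hl
          simpa using this
        have hmap : t.map (fun l => if env_line_key l == some name then rendered else l) = t := by
          have h2 := List.map_congr_left (l := t)
            (f := fun l => if env_line_key l == some name then rendered else l) (g := id)
            (fun l hl => by simp [ht l hl])
          simpa using h2
        have hany : t.any (fun l => env_line_key l == some name) = false := by
          simp only [List.any_eq_false]; intro l hl; simpa using ht l hl
        simp [List.any_cons, hb, hany, hk]
        exact by simpa using hmap.symm
      | some i =>
        have hany : t.any (fun l => env_line_key l == some name) = true := by
          by_contra hc
          have hall : ∀ l ∈ t, ¬ env_line_key l = some name := by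
            have := Bool.eq_false_iff.mpr hc
            simp only [List.any_eq_false] at this
            intro l hl; simpa using this l hl
          have : List.findIdx? (fun l => env_line_key l == some name) t = none :=
            List.findIdx?_eq_none_iff.mpr (fun l hl => by simpa using hall l hl)
          simp [this] at hf
        rw [hf] at ih
        simp [List.any_cons, hb, hany] at ih ⊢
        simp [hk, ih]

-- ===== VERDICT (by name: the statement is the Claim_ definition above) =====
theorem replace_env_lines_spec : Claim_equal_replace_env_lines := by
  intro lines name rendered _
  unfold Spec_replace_env_lines replace_env_lines
  rw [alt_eq]
  simp only [fold_eq_map_any, Bool.false_or, List.nil_append]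
  by_cases h : lines.any (fun l => env_line_key l == some name) <;> simp [h]
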